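-- pv_equiv track=rewrite | github.com/NiklasTiede/Github-Trending-API | app/scraping.py | filter_articles
-- ===== SOURCE A (Python) =====
-- def filter_articles(raw_html: str) -> str:
--     """Filters html out, which is not enclosed by article-tags.
--     Beautifulsoup is inaccurate and slow when applied on a larger
--     html string, this filtration fixes this.
--     """
--     raw_html = raw_html.split("\n")
--
--     # count number of article tags within the document (varies from 0 to 50):
--     article_tags_count = 0
--     tag = "article"
--     for line in raw_html:
--         if tag in line:
--             article_tags_count += 1
--
--     # copy HTML enclosed by first and last article-tag:
--     articles_arrays, is_article = [], False
--     for line in raw_html: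
--         if tag in line:
--             article_tags_count -= 1
--             is_article = True
--         if is_article:
--             articles_arrays.append(line)
--         if not article_tags_count:
--             is_article = False
--     return "".join(articles_arrays)
-- ===== SOURCE B (Python) =====
-- def filter_articles(raw_html: str) -> str:
--     """Filters html out, which is not enclosed by article-tags."""
--     lines = raw_html.split("\n")
--     idx = [i for i, line in enumerate(lines) if "article" in line]
--     if not idx:
--         return ""
--     return "".join(lines[idx[0]:idx[-1] + 1])
-- ===== Notes on version B (the rewrite author's own statement) =====
-- stated objective: simpler
-- what changed: A's two passes (a counting pass plus a decrementing-counter/flag state machine) are replaced by computing the list of indices of lines containing the tag once and joining a single slice from the first to the last such index.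
import Mathlib
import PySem

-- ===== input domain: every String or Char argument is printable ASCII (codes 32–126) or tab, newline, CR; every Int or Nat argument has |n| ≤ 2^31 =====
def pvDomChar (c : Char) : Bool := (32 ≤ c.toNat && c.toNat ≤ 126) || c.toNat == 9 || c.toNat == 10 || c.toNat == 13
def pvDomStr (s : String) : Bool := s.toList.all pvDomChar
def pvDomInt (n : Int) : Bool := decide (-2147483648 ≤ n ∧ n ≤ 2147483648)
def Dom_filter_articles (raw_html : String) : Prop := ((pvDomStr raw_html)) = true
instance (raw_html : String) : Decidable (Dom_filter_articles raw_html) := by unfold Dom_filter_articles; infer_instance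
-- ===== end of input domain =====

-- B replaces A's two-pass decrementing-counter state machine by computing the article-line
-- indices once and taking a single slice from the first to the last one (objective: simpler).

-- ===== PORT A =====
-- literal port of A: count article lines, then a second pass driven by (count, acc, is_article)
def filter_articles (raw_html : String) : String :=
  let lines := (PySem.Str.split? raw_html "\n").getD []   -- sep "\n" ≠ "", so split? never raises
  let tag := "article"
  let cnt : Int := lines.foldl (fun c line => if PySem.Str.isIn tag line then c + 1 else c) 0
  let fin := lines.foldl (fun (st : Int × List String × Bool) line =>
      let c := if PySem.Str.isIn tag line then st.1 - 1 else st.1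
      let b := if PySem.Str.isIn tag line then true else st.2.2
      let acc := if b then st.2.1 ++ [line] else st.2.1
      let b' := if c = 0 then false else b
      (c, acc, b')) (cnt, ([], false))
  PySem.Str.join "" fin.2.1

-- ===== PORT B =====
-- literal port of Source B: indices of lines containing "article", then one slice
def filter_articles_alt (raw_html : String) : String :=
  let lines := (PySem.Str.split? raw_html "\n").getD []
  let idx := ((PySem.List.enumerate lines).filter
      (fun pr => PySem.Str.isIn "article" pr.2)).map (fun pr => pr.1)
  match idx with
  | [] => ""
  | i :: _ => PySem.Str.join "" (PySem.List.slice lines (some i) (some (PySem.List.pyGetD idx (-1) 0 + 1)))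

-- ===== PRECONDITION & SPEC =====
def Spec_filter_articles (raw_html : String) (out : String) : Prop := out = filter_articles_alt raw_html
instance (raw_html : String) (out : String) : Decidable (Spec_filter_articles raw_html out) := by unfold Spec_filter_articles; infer_instance

-- ===== CLAIM (what is proved, stated in full; the proofs are below) =====
def Claim_equal_filter_articles : Prop := ∀ (raw_html : String), Dom_filter_articles raw_html → Spec_filter_articles raw_html (filter_articles raw_html)

-- ===== LEMMAS AND PROOFS =====

-- A's second loop body, abstracted over the line predicate
def pvStep {α : Type} (p : α → Bool) (st : Int × List α × Bool) (l : α) : Int × List α × Bool :=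
  let c := if p l then st.1 - 1 else st.1
  let b := if p l then true else st.2.2
  let acc := if b then st.2.1 ++ [l] else st.2.1
  let b' := if c = 0 then false else b
  (c, acc, b')

-- the canonical segment: elements from the first p-element to the last p-element, inclusive
def pvSeg {α : Type} (p : α → Bool) (ls : List α) : List α :=
  ((ls.dropWhile (fun x => !p x)).reverse.dropWhile (fun x => !p x)).reverse

theorem pv_getLast?_cons_of_ne_nil {α : Type} (a : α) {l : List α} (h : l ≠ []) :
    (a :: l).getLast? = l.getLast? := by
  cases l with
  | nil => exact absurd rfl h
  | cons b t => rw [List.getLast?_cons_cons]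

theorem pv_dropWhile_eq_drop {α : Type} (q : α → Bool) (L : List α) :
    L.dropWhile q = L.drop (L.takeWhile q).length := by
  induction L with
  | nil => rfl
  | cons l L ih =>
    by_cases hq : q l = true
    · rw [List.dropWhile_cons_of_pos hq, List.takeWhile_cons_of_pos hq,
        List.length_cons, List.drop_succ_cons, ih]
    · have hq' : q l = false := by revert hq; cases q l <;> simp
      rw [List.dropWhile_cons_of_neg (by simp [hq']), List.takeWhile_cons_of_neg (by simp [hq'])]
      rfl

theorem pv_tw_lt {α : Type} {p : α → Bool} {L : List α} (h : 0 < L.countP p) :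
    (L.takeWhile (fun x => !p x)).length < L.length := by
  rcases Nat.lt_or_ge (L.takeWhile (fun x => !p x)).length L.length with h' | h'
  · exact h'
  · exfalso
    have hpre := List.takeWhile_prefix (l := L) (fun x => !p x)
    have hle := hpre.length_le
    have heq : L.takeWhile (fun x => !p x) = L := hpre.eq_of_length (le_antisymm hle h')
    have hall := List.takeWhile_eq_self_iff.mp heq
    have : L.countP p = 0 := by
      rw [List.countP_eq_zero]
      intro x hx
      simpa using hall x hx
    omega

theorem pv_dropWhile_nil {α : Type} {p : α → Bool} {L : List α} (h : L.countP p = 0) :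
    L.dropWhile (fun x => !p x) = [] := by
  rw [List.dropWhile_eq_nil_iff]
  intro x hx
  simpa using List.countP_eq_zero.mp h x hx

theorem pv_countP_reverse {α : Type} (p : α → Bool) (L : List α) :
    L.reverse.countP p = L.countP p := by
  simp [List.countP_eq_length_filter]

-- when the front part still holds a p-element, appending does not change takeWhile/dropWhile
theorem pv_takeWhile_append_left {α : Type} {p : α → Bool} {L M : List α}
    (h : 0 < L.countP p) :
    (L ++ M).takeWhile (fun x => !p x) = L.takeWhile (fun x => !p x) := by
  rw [List.takeWhile_append, if_neg (by have := pv_tw_lt h; omega)]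

theorem pv_dropWhile_append_left {α : Type} {p : α → Bool} {L M : List α}
    (h : 0 < L.countP p) :
    (L ++ M).dropWhile (fun x => !p x) = L.dropWhile (fun x => !p x) ++ M := by
  rw [List.dropWhile_append, if_neg]
  intro hemp
  have hnil := List.isEmpty_iff.mp hemp
  rw [pv_dropWhile_eq_drop, List.drop_eq_nil_iff] at hnil
  have := pv_tw_lt h
  omega

-- A's loop once the count is exhausted and the flag is down: it changes nothing
theorem pv_lem_done {α : Type} {p : α → Bool} {ls : List α} (h : ls.countP p = 0) :
    ∀ (c : Int) (acc : List α), ls.foldl (pvStep p) (c, acc, false) = (c, acc, false) := by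
  induction ls with
  | nil => intro c acc; rfl
  | cons l ls ih =>
    intro c acc
    have hl : p l = false := by
      by_contra hl'
      have hpl : p l = true := by revert hl'; cases p l <;> simp
      rw [List.countP_cons, hpl] at h
      simp at h
    have hls : ls.countP p = 0 := by rw [List.countP_cons, hl] at h; simpa using h
    simp only [List.foldl_cons, pvStep, hl, Bool.false_eq_true, if_false, ite_self]
    exact ih hls c acc

-- A's loop in "inside an article" mode copies everything up to the last p-element
theorem pv_lem_inside {α : Type} {p : α → Bool} :
    ∀ (ls : List α) (acc : List α), 0 < ls.countP p →
      (ls.foldl (pvStep p) ((ls.countP p : Int), acc, true)).2.1 =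
        acc ++ (ls.reverse.dropWhile (fun x => !p x)).reverse := by
  intro ls
  induction ls with
  | nil => intro acc h; simp at h
  | cons l ls ih =>
    intro acc hpos
    by_cases hl : p l = true
    · have hcnt : (l :: ls).countP p = ls.countP p + 1 := by simp [hl]
      by_cases hz : ls.countP p = 0
      · have hstep : ((l :: ls).countP p : Int) - 1 = 0 := by rw [hcnt, hz]; norm_num
        simp only [List.foldl_cons, pvStep, hl, if_true, hstep]
        rw [pv_lem_done hz]
        have hdw : ls.reverse.countP p = 0 := by rw [pv_countP_reverse]; exact hz
        simp [List.dropWhile_append, pv_dropWhile_nil hdw, hl]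
      · have hpos' : 0 < ls.countP p := Nat.pos_of_ne_zero hz
        have hstep : ((l :: ls).countP p : Int) - 1 = (ls.countP p : Int) := by
          rw [hcnt]; push_cast; ring
        have hnz : ((ls.countP p : Int)) ≠ 0 := by exact_mod_cast hz
        simp only [List.foldl_cons, pvStep, hl, if_true, hstep, if_neg hnz]
        rw [ih (acc ++ [l]) hpos']
        have hrev : 0 < ls.reverse.countP p := by rw [pv_countP_reverse]; exact hpos'
        rw [List.reverse_cons, pv_dropWhile_append_left hrev]
        simp
    · have hl' : p l = false := by revert hl; cases p l <;> simp
      have hcnt : (l :: ls).countP p = ls.countP p := by simp [hl']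
      have hpos' : 0 < ls.countP p := by rw [hcnt] at hpos; exact hpos
      have hnz : ((ls.countP p : Int)) ≠ 0 := by
        exact_mod_cast (by omega : ls.countP p ≠ 0)
      simp only [List.foldl_cons, pvStep, hl', Bool.false_eq_true, if_false, ite_self,
        hcnt, if_true, if_neg hnz]
      rw [ih (acc ++ [l]) hpos']
      have hrev : 0 < ls.reverse.countP p := by rw [pv_countP_reverse]; exact hpos'
      rw [List.reverse_cons, pv_dropWhile_append_left hrev]
      simp

-- A's loop from the start collects exactly the segment pvSeg
theorem pv_lem_main {α : Type} {p : α → Bool} :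
    ∀ (ls : List α) (acc : List α),
      (ls.foldl (pvStep p) ((ls.countP p : Int), acc, false)).2.1 = acc ++ pvSeg p ls := by
  intro ls
  induction ls with
  | nil => intro acc; simp [pvSeg]
  | cons l ls ih =>
    intro acc
    by_cases hl : p l = true
    · have hcnt : (l :: ls).countP p = ls.countP p + 1 := by simp [hl]
      have hseg : pvSeg p (l :: ls) = ((l :: ls).reverse.dropWhile (fun x => !p x)).reverse := by
        rw [pvSeg, List.dropWhile_cons_of_neg (by simp [hl])]
      by_cases hz : ls.countP p = 0
      · have hstep : ((l :: ls).countP p : Int) - 1 = 0 := by rw [hcnt, hz]; norm_num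
        simp only [List.foldl_cons, pvStep, hl, if_true, hstep]
        rw [pv_lem_done hz, hseg]
        have hdw : ls.reverse.countP p = 0 := by rw [pv_countP_reverse]; exact hz
        simp [List.dropWhile_append, pv_dropWhile_nil hdw, hl]
      · have hpos' : 0 < ls.countP p := Nat.pos_of_ne_zero hz
        have hstep : ((l :: ls).countP p : Int) - 1 = (ls.countP p : Int) := by
          rw [hcnt]; push_cast; ring
        have hnz : ((ls.countP p : Int)) ≠ 0 := by exact_mod_cast hz
        simp only [List.foldl_cons, pvStep, hl, if_true, hstep, if_neg hnz]
        rw [pv_lem_inside ls (acc ++ [l]) hpos', hseg]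
        have hrev : 0 < ls.reverse.countP p := by rw [pv_countP_reverse]; exact hpos'
        rw [List.reverse_cons, pv_dropWhile_append_left hrev]
        simp
    · have hl' : p l = false := by revert hl; cases p l <;> simp
      have hcnt : (l :: ls).countP p = ls.countP p := by simp [hl']
      have hseg : pvSeg p (l :: ls) = pvSeg p ls := by
        rw [pvSeg, pvSeg, List.dropWhile_cons_of_pos (by simp [hl'])]
      simp only [List.foldl_cons, pvStep, hl', Bool.false_eq_true, if_false, ite_self, hcnt]
      rw [ih acc, hseg]

-- B's index list is empty exactly when no line matches
theorem pv_idx_nil_iff {α : Type} {p : α → Bool} (ls : List α) :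
    ∀ s : Int, (((PySem.List.enumerate ls s).filter (fun pr => p pr.2)).map (fun pr => pr.1) = []
      ↔ ls.countP p = 0) := by
  induction ls with
  | nil => intro s; simp [PySem.List.enumerate]
  | cons l ls ih =>
    intro s
    by_cases hl : p l = true
    · simp [PySem.List.enumerate_cons, hl]
    · have hl' : p l = false := by revert hl; cases p l <;> simp
      simp [PySem.List.enumerate_cons, hl', ih (s + 1)]

-- head of B's index list = index of the first matching line
theorem pv_idx_head {α : Type} {p : α → Bool} :
    ∀ (ls : List α), 0 < ls.countP p → ∀ s : Int,
      (((PySem.List.enumerate ls s).filter (fun pr => p pr.2)).map (fun pr => pr.1)).head? =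
        some (s + ((ls.takeWhile (fun x => !p x)).length : Int)) := by
  intro ls
  induction ls with
  | nil => intro h; simp at h
  | cons l ls ih =>
    intro hpos s
    by_cases hl : p l = true
    · rw [List.takeWhile_cons_of_neg (by simp [hl])]
      simp [PySem.List.enumerate_cons, hl]
    · have hl' : p l = false := by revert hl; cases p l <;> simp
      have hpos' : 0 < ls.countP p := by
        rw [List.countP_cons, hl'] at hpos; simpa using hpos
      rw [PySem.List.enumerate_cons]
      simp only [List.filter_cons, hl', Bool.false_eq_true, if_false]
      rw [ih hpos' (s + 1), List.takeWhile_cons_of_pos (by simp [hl'])]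
      congr 1
      simp only [List.length_cons]
      push_cast
      ring

-- last element of B's index list = index of the last matching line
theorem pv_idx_last {α : Type} {p : α → Bool} :
    ∀ (ls : List α), 0 < ls.countP p → ∀ s : Int,
      (((PySem.List.enumerate ls s).filter (fun pr => p pr.2)).map (fun pr => pr.1)).getLast? =
        some (s + (ls.length : Int) - 1 - ((ls.reverse.takeWhile (fun x => !p x)).length : Int)) := by
  intro ls
  induction ls with
  | nil => intro h; simp at h
  | cons l ls ih =>
    intro hpos s
    by_cases hz : ls.countP p = 0
    · have hl : p l = true := by
        by_contra hl'
        have hl'' : p l = false := by revert hl'; cases p l <;> simp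
        rw [List.countP_cons, hl'', hz] at hpos; simp at hpos
      have hidx : ((PySem.List.enumerate ls (s + 1)).filter (fun pr => p pr.2)).map
          (fun pr : Int × α => pr.1) = [] := (pv_idx_nil_iff ls (s + 1)).mpr hz
      rw [PySem.List.enumerate_cons]
      simp only [List.filter_cons, hl, if_true, List.map_cons, hidx]
      have hall : ls.reverse.takeWhile (fun x => !p x) = ls.reverse := by
        rw [List.takeWhile_eq_self_iff]
        intro x hx
        have := List.countP_eq_zero.mp hz x (List.mem_reverse.mp hx)
        simpa using this
      rw [List.reverse_cons, List.takeWhile_append,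
        if_pos (by rw [hall]), List.takeWhile_cons_of_neg (by simp [hl])]
      simp only [List.getLast?_singleton, List.length_cons, List.append_nil,
        List.length_reverse]
      congr 1
      push_cast
      ring
    · have hpos' : 0 < ls.countP p := Nat.pos_of_ne_zero hz
      have hrev : 0 < ls.reverse.countP p := by rw [pv_countP_reverse]; exact hpos'
      have hne : ((PySem.List.enumerate ls (s + 1)).filter (fun pr => p pr.2)).map
          (fun pr : Int × α => pr.1) ≠ [] := by
        intro hnil
        exact hz ((pv_idx_nil_iff ls (s + 1)).mp hnil)
      have htw : (l :: ls).reverse.takeWhile (fun x => !p x) =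
          ls.reverse.takeWhile (fun x => !p x) := by
        rw [List.reverse_cons]
        exact pv_takeWhile_append_left hrev
      have htwlt := pv_tw_lt (p := p) hrev
      rw [List.length_reverse] at htwlt
      rw [PySem.List.enumerate_cons, htw]
      by_cases hl : p l = true
      · simp only [List.filter_cons, hl, if_true, List.map_cons]
        rw [pv_getLast?_cons_of_ne_nil _ hne, ih hpos' (s + 1)]
        congr 1
        simp only [List.length_cons]
        push_cast
        ring
      · have hl' : p l = false := by revert hl; cases p l <;> simp
        simp only [List.filter_cons, hl', Bool.false_eq_true, if_false]
        rw [ih hpos' (s + 1)]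
        congr 1
        simp only [List.length_cons]
        push_cast
        ring

-- the slice from the first to the last matching index is the canonical segment
theorem pv_slice_eq_seg {α : Type} {p : α → Bool} {ls : List α} (h : 0 < ls.countP p) :
    PySem.List.slice ls (some ((ls.takeWhile (fun x => !p x)).length : Int))
        (some ((ls.length : Int) - 1 - ((ls.reverse.takeWhile (fun x => !p x)).length : Int) + 1)) =
      pvSeg p ls := by
  have hrevc : 0 < ls.reverse.countP p := by rw [pv_countP_reverse]; exact h
  have ht := pv_tw_lt (p := p) hrevc
  rw [List.length_reverse] at ht
  have hb : (ls.length : Int) - 1 - ((ls.reverse.takeWhile (fun x => !p x)).length : Int) + 1 =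
      ((ls.length - (ls.reverse.takeWhile (fun x => !p x)).length : Nat) : Int) := by
    push_cast [Nat.cast_sub (le_of_lt ht)]
    ring
  rw [hb, PySem.List.slice_natCast]
  have htake_eq : ls.take (ls.takeWhile (fun x => !p x)).length = ls.takeWhile (fun x => !p x) :=
    (List.prefix_iff_eq_take.mp (List.takeWhile_prefix _)).symm
  have htake0 : (ls.take (ls.takeWhile (fun x => !p x)).length).countP p = 0 := by
    rw [htake_eq, List.countP_eq_zero]
    intro x hx
    simpa using List.mem_takeWhile_imp hx
  have hdropc : 0 < (ls.drop (ls.takeWhile (fun x => !p x)).length).countP p := by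
    have hsum : ls.countP p =
        (ls.take (ls.takeWhile (fun x => !p x)).length).countP p +
        (ls.drop (ls.takeWhile (fun x => !p x)).length).countP p := by
      rw [← List.countP_append, List.take_append_drop]
    omega
  have hdroprev : 0 < (ls.drop (ls.takeWhile (fun x => !p x)).length).reverse.countP p := by
    rw [pv_countP_reverse]; exact hdropc
  have hsplit : ls.reverse = (ls.drop (ls.takeWhile (fun x => !p x)).length).reverse ++
      (ls.take (ls.takeWhile (fun x => !p x)).length).reverse := by
    rw [← List.reverse_append, List.take_append_drop]
  have ht2 : ls.reverse.takeWhile (fun x => !p x) =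
      (ls.drop (ls.takeWhile (fun x => !p x)).length).reverse.takeWhile (fun x => !p x) := by
    rw [hsplit]
    exact pv_takeWhile_append_left hdroprev
  rw [pvSeg, pv_dropWhile_eq_drop (fun x => !p x) ls,
    pv_dropWhile_eq_drop (fun x => !p x) ((ls.drop (ls.takeWhile (fun x => !p x)).length).reverse),
    ← ht2, List.reverse_drop, List.reverse_reverse, List.length_reverse, List.length_drop]
  congr 1
  omega

-- the whole equivalence, at the level of the split line list, for any line predicate
theorem pv_AB (p : String → Bool) (lines : List String) :
    PySem.Str.join "" ((lines.foldl (fun (st : Int × List String × Bool) line =>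
        let c := if p line then st.1 - 1 else st.1
        let b := if p line then true else st.2.2
        let acc := if b then st.2.1 ++ [line] else st.2.1
        let b' := if c = 0 then false else b
        (c, acc, b'))
      ((lines.foldl (fun c line => if p line then c + 1 else c) 0), ([], false))).2.1) =
    (match ((PySem.List.enumerate lines).filter (fun pr => p pr.2)).map (fun pr => pr.1) with
     | [] => ""
     | i :: _ => PySem.Str.join "" (PySem.List.slice lines (some i)
         (some (PySem.List.pyGetD
           (((PySem.List.enumerate lines).filter (fun pr => p pr.2)).map (fun pr => pr.1)) (-1) 0
           + 1)))) := by
  rw [PySem.List.foldl_count_if, zero_add]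
  have hstep : (fun (st : Int × List String × Bool) line =>
        let c := if p line then st.1 - 1 else st.1
        let b := if p line then true else st.2.2
        let acc := if b then st.2.1 ++ [line] else st.2.1
        let b' := if c = 0 then false else b
        (c, acc, b')) = pvStep p := rfl
  rw [hstep, pv_lem_main lines [], List.nil_append]
  by_cases hz : lines.countP p = 0
  · have hidx : ((PySem.List.enumerate lines 0).filter (fun pr => p pr.2)).map
        (fun pr : Int × String => pr.1) = [] := (pv_idx_nil_iff lines 0).mpr hz
    rw [hidx]
    have hseg0 : pvSeg p lines = [] := by
      rw [pvSeg, pv_dropWhile_nil hz]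
      rfl
    rw [hseg0]
    rfl
  · have hpos : 0 < lines.countP p := Nat.pos_of_ne_zero hz
    rcases hidx : ((PySem.List.enumerate lines 0).filter (fun pr => p pr.2)).map
        (fun pr : Int × String => pr.1) with _ | ⟨i, rest⟩
    · exact absurd ((pv_idx_nil_iff lines 0).mp hidx) hz
    · rw [hidx]
      have hhead := pv_idx_head lines hpos 0
      rw [hidx, List.head?_cons, zero_add] at hhead
      have hi : i = ((lines.takeWhile (fun x => !p x)).length : Int) := by
        exact Option.some.inj hhead
      have hlast := pv_idx_last lines hpos 0
      rw [hidx] at hlast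
      have hne : i :: rest ≠ [] := by simp
      have hgl : PySem.List.pyGetD (i :: rest) (-1) (0 : Int) =
          (lines.length : Int) - 1 - ((lines.reverse.takeWhile (fun x => !p x)).length : Int) := by
        rw [PySem.List.pyGetD_neg_one _ _ hne]
        have := List.getLast?_eq_some_getLast hne
        rw [this, zero_add] at hlast
        exact Option.some.inj hlast
      show PySem.Str.join "" (pvSeg p lines) = PySem.Str.join "" (PySem.List.slice lines
        (some i) (some (PySem.List.pyGetD (i :: rest) (-1) 0 + 1)))
      rw [hgl, hi, pv_slice_eq_seg hpos]

-- ===== VERDICT (by name: the statement is the Claim_ definition above) =====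
theorem filter_articles_spec : Claim_equal_filter_articles := by
  intro raw_html _
  show filter_articles raw_html = filter_articles_alt raw_html
  exact pv_AB (fun line => PySem.Str.isIn "article" line)
    ((PySem.Str.split? raw_html "\n").getD [])
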